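-- pv_equiv track=rewrite | github.com/981377660LMT/algorithm-study | 22_专题/绝对值/移动球.py | solve
-- ===== SOURCE A (Python) =====
-- def solve(nums):
--     suffixSum = [0 for _ in range(len(nums))]
--     prefixSum = [0 for _ in range(len(nums))]
--
--     prefixCount = 0
--     for i in range(len(nums)):
--         prefixSum[i] = prefixCount + (prefixSum[i - 1] if i - 1 >= 0 else 0)
--         if nums[i] == 1:
--             prefixCount += 1
--
--     suffixCount = 0
--     for i in range(len(nums) - 1, -1, -1):
--         suffixSum[i] = suffixCount + (suffixSum[i + 1] if len(nums) > i + 1 else 0)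
--         if nums[i] == 1:
--             suffixCount += 1
--
--     res = [prefixSum[i] + suffixSum[i] for i in range(len(nums))]
--
--     return res
-- ===== SOURCE B (Python) =====
-- def solve(nums):
--     ones = [j for j, v in enumerate(nums) if v == 1]
--     return [sum(abs(i - j) for j in ones) for i in range(len(nums))]
-- ===== Notes on version B (the rewrite author's own statement) =====
-- stated objective: simpler
-- what changed: B collects the positions of the 1s once and computes each index's cost as a direct sum of absolute distances, replacing A's two prefix/suffix running-sum passes over auxiliary arrays.
import Mathlib
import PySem

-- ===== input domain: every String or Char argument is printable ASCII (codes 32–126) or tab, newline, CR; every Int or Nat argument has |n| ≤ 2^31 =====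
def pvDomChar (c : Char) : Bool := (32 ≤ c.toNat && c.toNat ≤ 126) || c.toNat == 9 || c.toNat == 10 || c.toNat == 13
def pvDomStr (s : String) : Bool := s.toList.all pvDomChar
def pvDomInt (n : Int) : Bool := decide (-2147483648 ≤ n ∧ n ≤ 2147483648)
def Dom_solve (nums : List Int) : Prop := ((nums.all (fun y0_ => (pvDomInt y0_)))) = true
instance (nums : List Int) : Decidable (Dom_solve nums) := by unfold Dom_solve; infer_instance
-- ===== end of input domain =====

-- B replaces A's two prefix/suffix running-sum passes by collecting the positions of the 1s
-- once and summing absolute distances directly (objective: simpler).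

-- ===== PORT A =====
-- the prefix loop: state = (prefixSum so far, prefixCount); prefixSum[i-1] is the last
-- element written so far (0 when i = 0).  The suffix loop is the same recurrence run
-- from the right, i.e. this loop on the reversed list, written back reversed.
def solveGo (nums : List Int) : List Int × Int :=
  nums.foldl
    (fun (s : List Int × Int) x =>
      (s.1 ++ [s.2 + s.1.getLastD 0], s.2 + (if x = 1 then (1 : Int) else 0)))
    ([], 0)

def solve (nums : List Int) : List Int :=
  let prefixSum := (solveGo nums).1
  let suffixSum := ((solveGo nums.reverse).1).reverse
  (List.range nums.length).map (fun i => prefixSum.getD i 0 + suffixSum.getD i 0)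

-- ===== PORT B =====
def solve_alt (nums : List Int) : List Int :=
  let ones := ((PySem.List.enumerate nums 0).filter (fun p => p.2 == 1)).map (fun p => p.1)
  (List.range nums.length).map (fun (i : Nat) => (ones.map (fun j => |(i : Int) - j|)).sum)

-- ===== PRECONDITION & SPEC =====
def Spec_solve (nums : List Int) (out : List Int) : Prop := out = solve_alt nums
instance (nums : List Int) (out : List Int) : Decidable (Spec_solve nums out) := by unfold Spec_solve; infer_instance

-- ===== CLAIM (what is proved, stated in full; the proofs are below) =====
def Claim_equal_solve : Prop := ∀ (nums : List Int), Dom_solve nums → Spec_solve nums (solve nums)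

-- ===== LEMMAS AND PROOFS =====

-- cost of gathering the ones of l that lie strictly below index i at index i
def S (l : List Int) (i : Nat) : Int :=
  ∑ j ∈ Finset.range i, (if l.getD j 0 = 1 then (i : Int) - j else 0)

lemma S_step (l : List Int) (m : Nat) :
    S l (m + 1) = (∑ j ∈ Finset.range (m + 1), if l.getD j 0 = 1 then (1 : Int) else 0) + S l m := by
  unfold S
  have h : ∀ j ∈ Finset.range (m + 1),
      (if l.getD j 0 = 1 then ((m + 1 : Nat) : Int) - j else 0)
        = (if l.getD j 0 = 1 then (1 : Int) else 0)
          + (if l.getD j 0 = 1 ∧ j < m then (m : Int) - j else 0) := by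
    intro j hj
    simp only [Finset.mem_range] at hj
    split_ifs <;> push_cast <;> omega
  rw [Finset.sum_congr rfl h, Finset.sum_add_distrib]
  congr 1
  rw [Finset.sum_range_succ]
  simp only [lt_irrefl, and_false, if_false, add_zero]
  apply Finset.sum_congr rfl
  intro j hj
  simp only [Finset.mem_range] at hj
  split_ifs <;> simp_all

lemma S_append (l : List Int) (x : Int) (i : Nat) (h : i ≤ l.length) :
    S (l ++ [x]) i = S l i := by
  unfold S
  apply Finset.sum_congr rfl
  intro j hj
  simp only [Finset.mem_range] at hj
  rw [List.getD_append _ _ _ _ (by omega)]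

lemma solveGo_spec (l : List Int) :
    solveGo l = ((List.range l.length).map (fun i => S l i),
      ∑ j ∈ Finset.range l.length, if l.getD j 0 = 1 then (1 : Int) else 0) := by
  induction l using List.reverseRecOn with
  | nil => simp [solveGo, S]
  | append_singleton l x ih =>
    unfold solveGo at ih ⊢
    rw [List.foldl_append, ih]
    simp only [List.foldl_cons, List.foldl_nil, List.length_append, List.length_cons,
      List.length_nil, zero_add, Prod.mk.injEq]
    constructor
    · -- first component
      rw [List.range_succ, List.map_append, List.map_cons, List.map_nil]
      refine congrArg₂ (fun u v : List Int => u ++ v) ?_ ?_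
      · apply List.map_congr_left
        intro i hi
        simp only [List.mem_range] at hi
        exact (S_append l x i (by omega)).symm
      · rw [S_append l x l.length (le_refl _)]
        congr 1
        rcases Nat.eq_zero_or_pos l.length with h0 | hpos
        · rw [h0]
          simp [S]
        · obtain ⟨m, hm⟩ : ∃ m, l.length = m + 1 := ⟨l.length - 1, by omega⟩
          rw [hm, S_step]
          rw [List.range_succ, List.map_append]
          simp only [List.map_cons, List.map_nil, List.getLastD_concat]
    · -- second component
      rw [Finset.sum_range_succ]
      congr 1
      · apply Finset.sum_congr rfl
        intro j hj
        simp only [Finset.mem_range] at hj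
        rw [List.getD_append _ _ _ _ (by omega)]
      · rw [List.getD_append_right _ _ _ _ (le_refl _)]
        simp

lemma S_ext (l : List Int) (i : Nat) (h : i ≤ l.length) :
    S l i = ∑ j ∈ Finset.range l.length,
      (if l.getD j 0 = 1 ∧ j < i then (i : Int) - j else 0) := by
  unfold S
  have h1 : (∑ j ∈ Finset.range i, if l.getD j 0 = 1 then (i : Int) - j else 0)
      = ∑ j ∈ Finset.range i, (if l.getD j 0 = 1 ∧ j < i then (i : Int) - j else 0) := by
    apply Finset.sum_congr rfl
    intro j hj
    simp only [Finset.mem_range] at hj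
    split_ifs <;> simp_all
  rw [h1]
  apply Finset.sum_subset
  · intro y hy
    simp only [Finset.mem_range] at hy ⊢
    omega
  · intro j hj hj'
    simp only [Finset.mem_range] at hj hj'
    split_ifs with hc
    · omega
    · rfl

lemma S_rev (l : List Int) (i : Nat) (h : i < l.length) :
    S l.reverse (l.length - 1 - i)
      = ∑ j ∈ Finset.range l.length,
          (if l.getD j 0 = 1 ∧ i < j then (j : Int) - i else 0) := by
  rw [S_ext _ _ (by simp; omega)]
  rw [List.length_reverse]
  rw [← Finset.sum_range_reflect]
  apply Finset.sum_congr rfl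
  intro j hj
  simp only [Finset.mem_range] at hj
  have hrev : l.reverse.getD (l.length - 1 - j) 0 = l.getD j 0 := by
    rw [List.getD_eq_getElem _ _ (by simp; omega), List.getD_eq_getElem _ _ hj,
      List.getElem_reverse]
    congr 1
    omega
  rw [hrev]
  split_ifs with h1 h2 h2 <;> first
    | (exfalso; omega)
    | rfl
    | (push_cast; omega)

lemma sum_map_filter {α : Type} (p : α → Bool) (f : α → Int) (xs : List α) :
    ((xs.filter p).map f).sum = (xs.map (fun x => if p x then f x else 0)).sum := by
  induction xs with
  | nil => rfl
  | cons x t ih =>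
    by_cases hp : p x <;> simp [hp, ih]

lemma enum_sum (f : Int → Int) (l : List Int) (s : Int) :
    ((PySem.List.enumerate l s).map (fun p => if p.2 == 1 then f p.1 else 0)).sum
      = ∑ j ∈ Finset.range l.length, (if l.getD j 0 = 1 then f (s + j) else 0) := by
  induction l generalizing s with
  | nil => simp [PySem.List.enumerate_nil]
  | cons x t ih =>
    rw [PySem.List.enumerate_cons, List.map_cons, List.sum_cons, ih]
    simp only [List.length_cons]
    rw [Finset.sum_range_succ']
    simp only [List.getD_cons_succ, List.getD_cons_zero]
    have : ∀ j ∈ Finset.range t.length,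
        (if t.getD j 0 = 1 then f (s + 1 + (j : Int)) else 0)
          = (if t.getD j 0 = 1 then f (s + ((j : Int) + 1)) else 0) := by
      intro j hj
      split_ifs with hc
      · congr 1; push_cast; ring
      · rfl
    rw [Finset.sum_congr rfl this]
    have hx : ((if x == 1 then f s else 0) : Int)
        = (if x = 1 then f (s + ((0 : Nat) : Int)) else 0) := by
      simp [beq_iff_eq]
    push_cast at hx ⊢
    omega

lemma solve_alt_elem (l : List Int) (i : Nat) :
    ((((PySem.List.enumerate l 0).filter (fun p => p.2 == 1)).map (fun p => p.1)).map
        (fun j => |(i : Int) - j|)).sum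
      = ∑ j ∈ Finset.range l.length, (if l.getD j 0 = 1 then |(i : Int) - j| else 0) := by
  rw [List.map_map]
  have := sum_map_filter (fun p : Int × Int => p.2 == 1)
    (fun p => |(i : Int) - p.1|) (PySem.List.enumerate l 0)
  simp only [Function.comp_def] at this ⊢
  rw [this]
  have := enum_sum (fun j => |(i : Int) - j|) l 0
  simp only [zero_add] at this
  exact this

-- ===== VERDICT (by name: the statement is the Claim_ definition above) =====
theorem solve_spec : Claim_equal_solve := by
  intro nums _
  unfold Spec_solve solve solve_alt
  apply List.map_congr_left
  intro i hi
  simp only [List.mem_range] at hi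
  rw [solve_alt_elem]
  -- prefix element
  have hpre : ((solveGo nums).1).getD i 0 = S nums i := by
    rw [solveGo_spec]
    rw [List.getD_eq_getElem _ _ (by simp [hi]), List.getElem_map, List.getElem_range]
  have hsuf : (((solveGo nums.reverse).1).reverse).getD i 0
      = S nums.reverse (nums.length - 1 - i) := by
    rw [solveGo_spec]
    simp only [List.length_reverse]
    rw [List.getD_eq_getElem _ _ (by simp [hi]), List.getElem_reverse, List.getElem_map,
      List.getElem_range]
    congr 1
    simp
  rw [hpre, hsuf, S_ext nums i (by omega), S_rev nums i hi, ← Finset.sum_add_distrib]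
  apply Finset.sum_congr rfl
  intro j hj
  simp only [Finset.mem_range] at hj
  rcases lt_trichotomy j i with h | h | h
  · rw [abs_of_nonneg (by push_cast; omega)]
    split_ifs <;> push_cast <;> omega
  · subst h
    simp
  · rw [abs_of_nonpos (by push_cast; omega)]
    split_ifs <;> push_cast <;> omega
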